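-- pv_equiv track=rewrite | github.com/evan42mr/readPdf_pycharm | readPdf/main_file/read_pdf_numbers.py | extract_content_table
-- ===== SOURCE A (Python) =====
-- def extract_content_table(text):
--     # Number of the line where table of contents ends
--     tab_end_line = 0
--     # Flag for the start of the table of contents
--     tabStart = False
--     # Flag for the end of the table of contents
--     tabEnd = False
--     # Count lines after expected end of the table of contents
--     cnt_lines_after_expected_end = 0
--     # Leading spaces of the title, stored to distinguish from sub_titles
--     title_indent_spaces = -1
--
--     lst_idx_tab = []
--
--     line_counter = 0
--     for i, line in enumerate(text.splitlines()):
--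
--         line_counter += 1
--         count_dots = 0
--         temp_line = ''
--
--         found_content_item = line.find('..........')
--
--         if not tabEnd and found_content_item != -1:
--             tab_end_line = i
--
--             if not tabStart:
--                 tabStart = True
--
--             if title_indent_spaces == -1:
--                 title_indent_spaces = len(line) - len(line.lstrip(' '))
--
--             lst_idx_tab.append(line[:found_content_item])
--             cnt_lines_after_expected_end = 0
--
--         if tabStart and not tabEnd and found_content_item == -1:
--             cnt_lines_after_expected_end += 1
--             if cnt_lines_after_expected_end > 20:
--                 tabEnd = True
--                 break
--
--     return lst_idx_tab, tab_end_line, title_indent_spaces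
-- ===== SOURCE B (Python) =====
-- def extract_content_table(text):
--     lines = text.splitlines()
--     # All dotted (table-of-contents) lines with their absolute indices.
--     dotted = [(i, ln) for i, ln in enumerate(lines) if '..........' in ln]
--     if not dotted:
--         return [], 0, -1
--     # Keep dotted lines while the gap to the previous kept one stays <= 21
--     # (i.e. at most 20 non-dotted lines in between).
--     keep = [dotted[0]]
--     last = dotted[0][0]
--     for d in dotted[1:]:
--         if d[0] - last > 21:
--             break
--         keep.append(d)
--         last = d[0]
--     first_line = dotted[0][1]
--     indent = len(first_line) - len(first_line.lstrip(' '))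
--     entries = [ln[:ln.find('..........')] for _, ln in keep]
--     return entries, last, indent
-- ===== Notes on version B (the rewrite author's own statement) =====
-- stated objective: alternative
-- what changed: Replaces A's per-line flag/counter state machine with a two-phase pipeline: first collect all dotted lines with their indices in one comprehension, then keep a prefix of that list while consecutive dotted indices are at most 21 apart (= at most 20 intervening non-dotted lines), deriving entries, last index and indent from the kept list.
import Mathlib
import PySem

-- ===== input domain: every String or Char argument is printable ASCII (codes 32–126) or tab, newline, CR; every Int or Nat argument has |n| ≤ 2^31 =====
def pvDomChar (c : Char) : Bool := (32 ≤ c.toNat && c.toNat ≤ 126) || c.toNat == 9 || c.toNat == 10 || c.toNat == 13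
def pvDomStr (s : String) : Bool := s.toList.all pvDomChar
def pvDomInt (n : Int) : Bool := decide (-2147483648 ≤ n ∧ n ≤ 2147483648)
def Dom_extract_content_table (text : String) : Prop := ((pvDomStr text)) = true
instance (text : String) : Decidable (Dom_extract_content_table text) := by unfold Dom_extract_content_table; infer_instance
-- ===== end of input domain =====

-- B replaces A's per-line flag/counter state machine by a two-phase pipeline (collect all
-- dotted lines with indices, then keep a prefix while consecutive dotted indices are ≤ 21
-- apart); objective: alternative decomposition, same complexity.

-- hand port of s.lstrip(' '): drop leading space characters (exact: only ' ' is stripped)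
def pvLstripSpace (s : String) : String := String.ofList (s.toList.dropWhile (fun c => c == ' '))

-- ===== PORT A =====
-- the for-loop of A: state (lst_idx_tab, tab_end_line, tabStart, tabEnd, cnt_lines_after_expected_end, title_indent_spaces)
def pvLoopA : List (Int × String) → List String → Int → Bool → Bool → Int → Int → List String × Int × Int
  | [], lst, te, _ts, _tend, _cnt, ind => (lst, te, ind)
  | (i, line) :: rest, lst, te, ts, tend, cnt, ind =>
    let found := PySem.Str.find line ".........."
    if !tend && (found != -1) then
      let ts' := if !ts then true else ts
      let ind' := if ind = -1 then PySem.Str.len line - PySem.Str.len (pvLstripSpace line) else ind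
      pvLoopA rest (lst ++ [PySem.Str.slice line none (some found)]) i ts' tend 0 ind'
    else if ts && !tend && (found == -1) then
      if cnt + 1 > 20 then (lst, te, ind)  -- tabEnd = True; break
      else pvLoopA rest lst te ts tend (cnt + 1) ind
    else pvLoopA rest lst te ts tend cnt ind

def extract_content_table (text : String) : List String × Int × Int :=
  pvLoopA (PySem.List.enumerate (PySem.Str.splitlines text) 0) [] 0 false false 0 (-1)

-- ===== PORT B =====
-- the keep-loop of B: walks the dotted list, keeping entries while the index gap is ≤ 21;
-- returns (kept dotted lines, last kept index)
def pvKeepB : List (Int × String) → Int → List (Int × String) × Int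
  | [], last => ([], last)
  | d :: rest, last =>
    if d.1 - last > 21 then ([], last)
    else
      let r := pvKeepB rest d.1
      (d :: r.1, r.2)

def extract_content_table_alt (text : String) : List String × Int × Int :=
  let lines := PySem.Str.splitlines text
  let dotted := (PySem.List.enumerate lines 0).filter (fun p => PySem.Str.isIn ".........." p.2)
  match dotted with
  | [] => ([], 0, -1)
  | d0 :: ds =>
    let r := pvKeepB ds d0.1
    let keep := d0 :: r.1
    let indent := PySem.Str.len d0.2 - PySem.Str.len (pvLstripSpace d0.2)
    (keep.map (fun p => PySem.Str.slice p.2 none (some (PySem.Str.find p.2 ".........."))),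
     r.2, indent)

-- ===== PRECONDITION & SPEC =====
def Spec_extract_content_table (text : String) (out : List String × Int × Int) : Prop := out = extract_content_table_alt text
instance (text : String) (out : List String × Int × Int) : Decidable (Spec_extract_content_table text out) := by unfold Spec_extract_content_table; infer_instance

-- ===== CLAIM (what is proved, stated in full; the proofs are below) =====
def Claim_equal_extract_content_table : Prop := ∀ (text : String), Dom_extract_content_table text → Spec_extract_content_table text (extract_content_table text)

-- ===== LEMMAS AND PROOFS =====

-- A's test 'find ≠ -1' coincides with B's membership test '".........." in line'
lemma pv_find_beq (ln : String) :
    (PySem.Str.find ln ".........." != -1) = PySem.Str.isIn ".........." ln := by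
  by_cases h : PySem.Str.isIn ".........." ln = true
  · rw [h]
    exact bne_iff_ne.mpr
      ((PySem.Str.find_ne_neg_one_iff ln "..........").mpr
        ((PySem.Str.isIn_iff_infix ".........." ln).mp h))
  · rw [Bool.eq_false_iff.mpr h]
    have h1 : PySem.Str.find ln ".........." = -1 := by
      by_contra hne
      exact h ((PySem.Str.isIn_iff_infix ".........." ln).mpr
        ((PySem.Str.find_ne_neg_one_iff ln "..........").mp hne))
    rw [h1]
    decide

lemma pv_enum_cons {α : Type} (x : α) (L : List α) (s : Int) :
    PySem.List.enumerate (x :: L) s = (s, x) :: PySem.List.enumerate L (s + 1) := rfl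

lemma pv_enum_fst_ge (L : List String) (s : Int) :
    ∀ p ∈ PySem.List.enumerate L s, s ≤ p.1 := by
  induction L generalizing s with
  | nil => simp [PySem.List.enumerate]
  | cons ln L ih =>
    intro p hp
    rw [pv_enum_cons] at hp
    rcases List.mem_cons.mp hp with h | h
    · simp [h]
    · have := ih (s + 1) p h; omega

lemma pv_keep_nil (l : List (Int × String)) (last : Int)
    (h : ∀ p ∈ l, last + 21 < p.1) : pvKeepB l last = ([], last) := by
  cases l with
  | nil => rfl
  | cons d rest =>
    have hd := h d (by simp)
    simp only [pvKeepB]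
    rw [if_pos (by omega)]

lemma pv_indent_nonneg (ln : String) :
    0 ≤ PySem.Str.len ln - PySem.Str.len (pvLstripSpace ln) := by
  have h := List.length_dropWhile_le (p := fun c => c == ' ') ln.toList
  simp only [pvLstripSpace, PySem.Str.len, String.toList_ofList]
  omega

-- one-step reductions of A's loop body
lemma pv_stepA_dot_true (i : Int) (line : String) (rest : List (Int × String))
    (lst : List String) (te cnt ind : Int)
    (h : (PySem.Str.find line ".........." != -1) = true) (hind : ind ≠ -1) :
    pvLoopA ((i, line) :: rest) lst te true false cnt ind =
      pvLoopA rest (lst ++ [PySem.Str.slice line none (some (PySem.Str.find line ".........."))]) i true false 0 ind := by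
  simp only [pvLoopA]
  rw [h]
  rw [if_pos (show ((!false && true) = true) from rfl)]
  rw [if_neg hind]
  simp

lemma pv_stepA_dot_false (i : Int) (line : String) (rest : List (Int × String))
    (lst : List String) (te cnt : Int)
    (h : (PySem.Str.find line ".........." != -1) = true) :
    pvLoopA ((i, line) :: rest) lst te false false cnt (-1) =
      pvLoopA rest (lst ++ [PySem.Str.slice line none (some (PySem.Str.find line ".........."))]) i true false 0
        (PySem.Str.len line - PySem.Str.len (pvLstripSpace line)) := by
  simp only [pvLoopA]
  rw [h]
  rw [if_pos (show ((!false && true) = true) from rfl)]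
  simp

lemma pv_stepA_nodot_tab (i : Int) (line : String) (rest : List (Int × String))
    (lst : List String) (te cnt ind : Int)
    (h : (PySem.Str.find line ".........." != -1) = false) :
    pvLoopA ((i, line) :: rest) lst te true false cnt ind =
      if cnt + 1 > 20 then (lst, te, ind) else pvLoopA rest lst te true false (cnt + 1) ind := by
  have hq : (PySem.Str.find line ".........." == -1) = true := by
    cases hx : (PySem.Str.find line ".........." == -1) with
    | true => rfl
    | false => rw [bne, hx] at h; exact absurd h (by decide)
  simp only [pvLoopA]
  rw [h]
  rw [if_neg (show ¬ ((!false && false) = true) from by decide)]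
  rw [hq]
  rw [if_pos (show ((true && !false && true) = true) from rfl)]

lemma pv_stepA_nodot_notab (i : Int) (line : String) (rest : List (Int × String))
    (lst : List String) (te cnt ind : Int)
    (h : (PySem.Str.find line ".........." != -1) = false) :
    pvLoopA ((i, line) :: rest) lst te false false cnt ind =
      pvLoopA rest lst te false false cnt ind := by
  simp only [pvLoopA]
  rw [h]
  rw [if_neg (show ¬ ((!false && false) = true) from by decide)]
  rw [if_neg (show ¬ ((false && !false && (PySem.Str.find line ".........." == -1)) = true) from by simp)]

-- Phase 2: table started, cnt non-dotted lines since the last dotted line (index s-1-cnt),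
-- indent already set: A's loop yields exactly B's keep-loop on the remaining dotted lines.
lemma pv_loop2 (L : List String) (s : Int) (lst : List String) (cnt ind : Int)
    (h0 : 0 ≤ cnt) (h20 : cnt ≤ 20) (hind : ind ≠ -1) :
    pvLoopA (PySem.List.enumerate L s) lst (s - 1 - cnt) true false cnt ind =
      (lst ++ ((pvKeepB ((PySem.List.enumerate L s).filter (fun p => PySem.Str.isIn ".........." p.2)) (s - 1 - cnt)).1.map
          (fun p => PySem.Str.slice p.2 none (some (PySem.Str.find p.2 "..........")))),
       (pvKeepB ((PySem.List.enumerate L s).filter (fun p => PySem.Str.isIn ".........." p.2)) (s - 1 - cnt)).2,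
       ind) := by
  induction L generalizing s lst cnt with
  | nil => simp [PySem.List.enumerate, pvLoopA, pvKeepB]
  | cons ln L ih =>
    rw [pv_enum_cons]
    by_cases hd : PySem.Str.isIn ".........." ln = true
    · have hb : (PySem.Str.find ln ".........." != -1) = true := by rw [pv_find_beq]; exact hd
      rw [pv_stepA_dot_true _ _ _ _ _ _ _ hb hind,
          List.filter_cons_of_pos (p := fun q => PySem.Str.isIn ".........." q.2) (a := (s, ln)) hd]
      have hih := ih (s + 1) (lst ++ [PySem.Str.slice ln none (some (PySem.Str.find ln ".........."))]) 0 (by omega) (by omega)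
      rw [show (s + 1 : Int) - 1 - 0 = s by ring] at hih
      rw [hih]
      simp only [pvKeepB]
      rw [if_neg (show ¬ (s - (s - 1 - cnt) > 21) from by omega)]
      simp [List.append_assoc]
    · have hb : (PySem.Str.find ln ".........." != -1) = false := by
        rw [pv_find_beq, Bool.eq_false_iff.mpr hd]
      rw [pv_stepA_nodot_tab _ _ _ _ _ _ _ hb, List.filter_cons_of_neg (p := fun q => PySem.Str.isIn ".........." q.2) (a := (s, ln)) hd]
      by_cases hcnt : cnt + 1 > 20
      · rw [if_pos hcnt]
        rw [pv_keep_nil _ _ (fun p hp => by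
          have := pv_enum_fst_ge L (s + 1) p (List.mem_of_mem_filter hp)
          omega)]
        simp
      · rw [if_neg hcnt]
        have hih := ih (s + 1) lst (cnt + 1) (by omega) (by omega)
        rw [show (s + 1 : Int) - 1 - (cnt + 1) = s - 1 - cnt by ring] at hih
        exact hih

-- Phase 1: before any dotted line A's loop only scans; at the first dotted line the result
-- becomes B's match on the list of dotted lines.
lemma pv_loop1 (L : List String) (s : Int) :
    pvLoopA (PySem.List.enumerate L s) [] 0 false false 0 (-1) =
      (match (PySem.List.enumerate L s).filter (fun p => PySem.Str.isIn ".........." p.2) with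
       | [] => ([], 0, -1)
       | d0 :: ds =>
         ((d0 :: (pvKeepB ds d0.1).1).map (fun p => PySem.Str.slice p.2 none (some (PySem.Str.find p.2 ".........."))),
          (pvKeepB ds d0.1).2,
          PySem.Str.len d0.2 - PySem.Str.len (pvLstripSpace d0.2))) := by
  induction L generalizing s with
  | nil => simp [PySem.List.enumerate, pvLoopA]
  | cons ln L ih =>
    rw [pv_enum_cons]
    by_cases hd : PySem.Str.isIn ".........." ln = true
    · have hb : (PySem.Str.find ln ".........." != -1) = true := by rw [pv_find_beq]; exact hd
      rw [pv_stepA_dot_false _ _ _ _ _ _ hb, List.filter_cons_of_pos (p := fun q => PySem.Str.isIn ".........." q.2) (a := (s, ln)) hd]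
      have hindne : PySem.Str.len ln - PySem.Str.len (pvLstripSpace ln) ≠ -1 := by
        have := pv_indent_nonneg ln; omega
      have h2 := pv_loop2 L (s + 1) [PySem.Str.slice ln none (some (PySem.Str.find ln ".........."))] 0
        (PySem.Str.len ln - PySem.Str.len (pvLstripSpace ln)) (by omega) (by omega) hindne
      rw [show (s + 1 : Int) - 1 - 0 = s by ring] at h2
      rw [List.nil_append, h2]
      simp
    · have hb : (PySem.Str.find ln ".........." != -1) = false := by
        rw [pv_find_beq, Bool.eq_false_iff.mpr hd]
      rw [pv_stepA_nodot_notab _ _ _ _ _ _ _ hb, List.filter_cons_of_neg (p := fun q => PySem.Str.isIn ".........." q.2) (a := (s, ln)) hd]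
      exact ih (s + 1)

-- ===== VERDICT (by name: the statement is the Claim_ definition above) =====
theorem extract_content_table_spec : Claim_equal_extract_content_table := by
  intro text _
  unfold Spec_extract_content_table extract_content_table extract_content_table_alt
  rw [pv_loop1]
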